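-- pv_equiv track=rewrite | github.com/Lolomix351/SD_lab_3 | exercise_2.py | initial_deck_deque
-- ===== SOURCE A (Python) =====
-- from collections import deque
--
-- def initial_deck_deque(n):
--     S = ['W' if i % 2 == 0 else 'B' for i in range(n)]
--     D = deque()
--     for c in reversed(S):
--         if D:
--             D.appendleft(D.pop())
--         D.appendleft(c)
--     return list(D)
-- ===== SOURCE B (Python) =====
-- from collections import deque
--
-- def initial_deck_deque(n):
--     # Forward-simulate the deal over position indices, then scatter the
--     # alternating colors into the resulting permutation.
--     idx = deque(range(n))
--     order = []
--     while idx: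
--         order.append(idx.popleft())
--         if idx:
--             idx.append(idx.popleft())
--     result = [''] * len(order)
--     for i, p in enumerate(order):
--         result[p] = 'W' if i % 2 == 0 else 'B'
--     return result
-- ===== Notes on version B (the rewrite author's own statement) =====
-- stated objective: alternative
-- what changed: Instead of reconstructing the deck backwards by prepend-and-rotate over the reversed color sequence, B simulates the deal forwards on position indices to obtain the deal permutation and scatters the alternating colors into it.
import Mathlib
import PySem

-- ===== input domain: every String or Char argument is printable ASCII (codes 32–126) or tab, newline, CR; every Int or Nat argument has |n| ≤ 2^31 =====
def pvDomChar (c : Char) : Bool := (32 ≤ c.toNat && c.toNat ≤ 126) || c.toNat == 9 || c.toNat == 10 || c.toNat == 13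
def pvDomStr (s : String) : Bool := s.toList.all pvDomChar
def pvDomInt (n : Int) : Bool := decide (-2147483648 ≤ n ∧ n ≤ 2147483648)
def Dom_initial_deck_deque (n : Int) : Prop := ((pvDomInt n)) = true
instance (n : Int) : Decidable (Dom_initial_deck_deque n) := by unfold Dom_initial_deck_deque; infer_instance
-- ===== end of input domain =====

-- B replaces A's backward prepend-and-rotate reconstruction of the deck by a forward
-- simulation of the deal over position indices followed by a scatter of the alternating
-- colors into that permutation (objective: alternative; same cost).

-- ===== PORT A =====
-- 'if D: D.appendleft(D.pop())' — move the last element of the deque to the front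
def pvRotA (D : List String) : List String :=
  if D.isEmpty then D else D.getLast! :: D.dropLast

def initial_deck_deque (n : Int) : List String :=
  let S := (PySem.List.pyRange 0 n 1).map
    (fun i => if PySem.Int.mod i 2 = 0 then "W" else "B")
  -- 'for c in reversed(S): if D: D.appendleft(D.pop()); D.appendleft(c)'
  S.reverse.foldl (fun D c => c :: pvRotA D) []

-- ===== PORT B =====
-- 'while idx: order.append(idx.popleft()); if idx: idx.append(idx.popleft())'
def pvDealB : List Int → List Int
  | [] => []
  | [a] => [a]
  | a :: b :: rest => a :: pvDealB (rest ++ [b])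
termination_by l => l.length
decreasing_by simp

def initial_deck_deque_alt (n : Int) : List String :=
  let order := pvDealB (PySem.List.pyRange 0 n 1)
  let result := List.replicate order.length ""
  -- 'for i, p in enumerate(order): result[p] = …' (p is always in range)
  (PySem.List.enumerate order 0).foldl
    (fun res ip =>
      PySem.List.pySetD res ip.2 (if PySem.Int.mod ip.1 2 = 0 then "W" else "B"))
    result

-- ===== PRECONDITION & SPEC =====
def Spec_initial_deck_deque (n : Int) (out : List String) : Prop := out = initial_deck_deque_alt n
instance (n : Int) (out : List String) : Decidable (Spec_initial_deck_deque n out) := by unfold Spec_initial_deck_deque; infer_instance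

-- ===== CLAIM (what is proved, stated in full; the proofs are below) =====
def Claim_equal_initial_deck_deque : Prop := ∀ (n : Int), Dom_initial_deck_deque n → Spec_initial_deck_deque n (initial_deck_deque n)

-- ===== LEMMAS AND PROOFS =====

-- the alternating color of deal step k
def pvColor (k : Nat) : String := if k % 2 = 0 then "W" else "B"

-- generic deal on Nat indices (same recursion as pvDealB)
def pvDealN : List Nat → List Nat
  | [] => []
  | [a] => [a]
  | a :: b :: rest => a :: pvDealN (rest ++ [b])
termination_by l => l.length
decreasing_by simp

-- A's whole loop as a foldr
def pvUndeal (S : List String) : List String :=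
  S.foldr (fun c D => c :: pvRotA D) []

-- B's scatter loop, in clean Nat form
def pvScat (res : List String) (k : Nat) : List Nat → List String
  | [] => res
  | p :: ps => pvScat (res.set p (pvColor k)) (k + 1) ps

-- the same recursion at String
def pvDealS : List String → List String
  | [] => []
  | [a] => [a]
  | a :: b :: rest => a :: pvDealS (rest ++ [b])
termination_by l => l.length
decreasing_by simp

theorem pvDealB_map_cast (l : List Nat) :
    pvDealB (l.map (Nat.cast : Nat → Int)) = (pvDealN l).map (Nat.cast : Nat → Int) := by
  induction l using pvDealN.induct with
  | case1 => simp [pvDealB, pvDealN]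
  | case2 a => simp [pvDealB, pvDealN]
  | case3 a b rest ih =>
      simp only [List.map_cons, pvDealB, pvDealN]
      rw [show List.map (Nat.cast : Nat → Int) rest ++ [(b : Int)]
            = List.map (Nat.cast : Nat → Int) (rest ++ [b]) by simp, ih]

theorem pvDealS_map (l : List Nat) (f : Nat → String) :
    pvDealS (l.map f) = (pvDealN l).map f := by
  induction l using pvDealN.induct with
  | case1 => simp [pvDealS, pvDealN]
  | case2 a => simp [pvDealS, pvDealN]
  | case3 a b rest ih =>
      simp only [List.map_cons, pvDealS, pvDealN]
      rw [show List.map f rest ++ [f b] = List.map f (rest ++ [b]) by simp, ih]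

theorem pvDealN_perm (l : List Nat) : (pvDealN l).Perm l := by
  induction l using pvDealN.induct with
  | case1 => simp [pvDealN]
  | case2 a => simp [pvDealN]
  | case3 a b rest ih =>
      simp only [pvDealN]
      exact (ih.cons a).trans ((List.perm_append_singleton b rest).cons a)

theorem pvRotA_length (D : List String) : (pvRotA D).length = D.length := by
  unfold pvRotA
  rcases D with _ | ⟨d, ds⟩ <;> simp

theorem pvUndeal_length (S : List String) : (pvUndeal S).length = S.length := by
  induction S with
  | nil => simp [pvUndeal]
  | cons c S ih =>
      simp only [pvUndeal, List.foldr_cons, List.length_cons]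
      rw [← pvUndeal]
      rw [pvRotA_length, ih]

-- dealing undoes one rotate-prepend step
theorem pvDealS_rot (c : String) (D : List String) :
    pvDealS (c :: pvRotA D) = c :: pvDealS D := by
  rcases D with _ | ⟨d, ds⟩
  · simp [pvRotA, pvDealS]
  · have hne : (d :: ds) ≠ ([] : List String) := by simp
    unfold pvRotA
    simp only [List.isEmpty_cons, Bool.false_eq_true, if_false]
    have h1 : (d :: ds).getLast! = (d :: ds).getLast hne := by
      simp [List.getLast!_eq_getLast?_getD, List.getLast?_eq_some_getLast hne]
    rw [h1, show pvDealS (c :: (d :: ds).getLast hne :: (d :: ds).dropLast)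
          = c :: pvDealS ((d :: ds).dropLast ++ [(d :: ds).getLast hne]) by simp [pvDealS],
        show (d :: ds).dropLast ++ [(d :: ds).getLast hne] = d :: ds from
          List.dropLast_append_getLast hne]

theorem pvDealS_pvUndeal (S : List String) : pvDealS (pvUndeal S) = S := by
  induction S with
  | nil => simp [pvUndeal, pvDealS]
  | cons c S ih =>
      have h : pvUndeal (c :: S) = c :: pvRotA (pvUndeal S) := by simp [pvUndeal]
      rw [h, pvDealS_rot, ih]

theorem map_getD_range (L : List String) :
    (List.range L.length).map (fun i => L.getD i "") = L := by
  apply List.ext_getElem (by simp)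
  intro i h1 h2
  simp only [List.getElem_map, List.getElem_range]
  rw [List.getD_eq_getElem]

-- scatter leaves untouched positions alone
theorem pvScat_notmem (res : List String) (k : Nat) (ps : List Nat) (j : Nat)
    (hj : j ∉ ps) : (pvScat res k ps).getD j "" = res.getD j "" := by
  induction ps generalizing res k with
  | nil => simp [pvScat]
  | cons p ps ih =>
      simp only [List.mem_cons, not_or] at hj
      simp only [pvScat]
      rw [ih _ _ hj.2]
      rcases Nat.lt_or_ge j res.length with h | h
      · rw [List.getD_eq_getElem _ _ (by simpa using h),
          List.getD_eq_getElem _ _ h, List.getElem_set_ne (fun e => hj.1 e.symm)]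
      · rw [List.getD_eq_default _ _ (by simpa using h), List.getD_eq_default _ _ h]

theorem pvScat_length (res : List String) (k : Nat) (ps : List Nat) :
    (pvScat res k ps).length = res.length := by
  induction ps generalizing res k with
  | nil => simp [pvScat]
  | cons p ps ih => simp [pvScat, ih]

theorem pvScat_getD (ps : List Nat) (res : List String) (k : Nat) (j : Nat)
    (hnd : ps.Nodup) (hlt : ∀ p ∈ ps, p < res.length) (hj : j ∈ ps) :
    (pvScat res k ps).getD j "" = pvColor (k + ps.idxOf j) := by
  induction ps generalizing res k with
  | nil => cases hj
  | cons p ps ih =>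
      simp only [pvScat]
      rcases List.mem_cons.mp hj with rfl | hmem
      · have hnot : j ∉ ps := (List.nodup_cons.mp hnd).1
        rw [pvScat_notmem _ _ _ _ hnot]
        have hjlt : j < res.length := hlt j (by simp)
        rw [List.getD_eq_getElem _ _ (by simpa using hjlt), List.getElem_set_self]
        simp
      · have hne : j ≠ p := by
          rintro rfl; exact (List.nodup_cons.mp hnd).1 hmem
        rw [ih (res.set p (pvColor k)) (k + 1) (List.nodup_cons.mp hnd).2
          (fun q hq => by simpa using hlt q (List.mem_cons_of_mem _ hq)) hmem]
        have hb : (p == j) = false := beq_eq_false_iff_ne.mpr (Ne.symm hne)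
        have : List.idxOf j (p :: ps) = List.idxOf j ps + 1 := by
          simp [List.idxOf_cons, hb]
        rw [this]
        congr 1
        omega

-- bridge: B's enumerate/pySetD fold over cast indices IS pvScat
theorem foldl_enum_eq_pvScat (ps : List Nat) (res : List String) (s : Nat) :
    (PySem.List.enumerate (ps.map (Nat.cast : Nat → Int)) (s : Int)).foldl
      (fun res ip =>
        PySem.List.pySetD res ip.2 (if PySem.Int.mod ip.1 2 = 0 then "W" else "B"))
      res = pvScat res s ps := by
  induction ps generalizing res s with
  | nil => simp [pvScat, PySem.List.enumerate_nil]
  | cons p ps ih =>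
      simp only [List.map_cons, PySem.List.enumerate_cons, List.foldl_cons]
      have hmod : PySem.Int.mod (s : Int) 2 = 0 ↔ s % 2 = 0 := by
        rw [PySem.Int.mod_eq_emod_of_pos (by norm_num : (0:Int) < 2)]
        omega
      have hcolor : (if PySem.Int.mod (s : Int) 2 = 0 then "W" else "B") = pvColor s := by
        unfold pvColor
        by_cases h : s % 2 = 0
        · rw [if_pos (hmod.mpr h), if_pos h]
        · rw [if_neg (fun hh => h (hmod.mp hh)), if_neg h]
      rw [hcolor, PySem.List.pySetD_natCast]
      rw [show ((s : Int) + 1) = ((s + 1 : Nat) : Int) by push_cast; ring, ih]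
      simp [pvScat]

theorem foldl_enum_eq_pvScat0 (ps : List Nat) (res : List String) :
    (PySem.List.enumerate (ps.map (Nat.cast : Nat → Int)) 0).foldl
      (fun res ip =>
        PySem.List.pySetD res ip.2 (if PySem.Int.mod ip.1 2 = 0 then "W" else "B"))
      res = pvScat res 0 ps := by
  simpa using foldl_enum_eq_pvScat ps res 0

-- A's color list equals the clean Nat form
theorem colors_eq (n : Int) :
    (PySem.List.pyRange 0 n 1).map (fun i => if PySem.Int.mod i 2 = 0 then "W" else "B")
      = (List.range n.toNat).map pvColor := by
  rw [PySem.List.pyRange_one]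
  simp only [List.map_map, sub_zero]
  apply List.map_congr_left
  intro k hk
  simp only [Function.comp_apply, zero_add, pvColor]
  have hmod : PySem.Int.mod (k : Int) 2 = 0 ↔ k % 2 = 0 := by
    rw [PySem.Int.mod_eq_emod_of_pos (by norm_num : (0:Int) < 2)]
    omega
  by_cases h : k % 2 = 0
  · rw [if_pos (hmod.mpr h), if_pos h]
  · rw [if_neg (fun hh => h (hmod.mp hh)), if_neg h]

-- the core identity: A's backward reconstruction = B's forward-deal-and-scatter
theorem pv_core (m : Nat) :
    pvUndeal ((List.range m).map pvColor)
      = pvScat (List.replicate m "") 0 (pvDealN (List.range m)) := by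
  have hperm : (pvDealN (List.range m)).Perm (List.range m) := pvDealN_perm _
  have hlenps : (pvDealN (List.range m)).length = m := by simpa using hperm.length_eq
  have hmem : ∀ j, j ∈ pvDealN (List.range m) ↔ j < m := by
    intro j; rw [hperm.mem_iff, List.mem_range]
  have hnd : (pvDealN (List.range m)).Nodup := hperm.nodup_iff.mpr List.nodup_range
  have hlenL : (pvUndeal ((List.range m).map pvColor)).length = m := by
    rw [pvUndeal_length]; simp
  have hdeal : (pvDealN (List.range m)).map
      (fun i => (pvUndeal ((List.range m).map pvColor)).getD i "")
      = (List.range m).map pvColor := by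
    have h1 : (List.range m).map
        (fun i => (pvUndeal ((List.range m).map pvColor)).getD i "")
        = pvUndeal ((List.range m).map pvColor) := by
      have := map_getD_range (pvUndeal ((List.range m).map pvColor))
      rwa [hlenL] at this
    have h2 := pvDealS_map (List.range m)
      (fun i => (pvUndeal ((List.range m).map pvColor)).getD i "")
    rw [h1, pvDealS_pvUndeal] at h2
    exact h2.symm
  have hLj : ∀ j < m, (pvUndeal ((List.range m).map pvColor)).getD j ""
      = pvColor ((pvDealN (List.range m)).idxOf j) := by
    intro j hj
    have hjmem : j ∈ pvDealN (List.range m) := (hmem j).mpr hj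
    have hidx : (pvDealN (List.range m)).idxOf j < (pvDealN (List.range m)).length :=
      List.idxOf_lt_length_of_mem hjmem
    have e := congrArg (fun l => l.getD ((pvDealN (List.range m)).idxOf j) "") hdeal
    simp only at e
    rw [List.getD_eq_getElem _ _ (by simpa using hidx),
        List.getD_eq_getElem _ _ (by simpa [hlenps] using hidx),
        List.getElem_map, List.getElem_idxOf hidx] at e
    rw [e, List.getElem_map, List.getElem_range]
  have hRj : ∀ j < m, (pvScat (List.replicate m "") 0 (pvDealN (List.range m))).getD j ""
      = pvColor ((pvDealN (List.range m)).idxOf j) := by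
    intro j hj
    rw [pvScat_getD _ _ 0 j hnd
      (fun p hp => by simpa using (hmem p).mp hp) ((hmem j).mpr hj)]
    simp
  apply List.ext_getElem (by rw [hlenL, pvScat_length]; simp)
  intro i h1 h2
  have hi : i < m := by rwa [hlenL] at h1
  have e1 := hLj i hi
  have e2 := hRj i hi
  rw [List.getD_eq_getElem _ _ h1] at e1
  rw [List.getD_eq_getElem _ _ h2] at e2
  rw [e1, e2]

-- ===== VERDICT (by name: the statement is the Claim_ definition above) =====
theorem initial_deck_deque_spec : Claim_equal_initial_deck_deque := by
  intro n _
  unfold Spec_initial_deck_deque initial_deck_deque initial_deck_deque_alt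
  have hrange : PySem.List.pyRange 0 n 1
      = (List.range n.toNat).map (Nat.cast : Nat → Int) := by
    rw [PySem.List.pyRange_one]
    simp
  rw [colors_eq n, List.foldl_reverse, hrange, pvDealB_map_cast,
      foldl_enum_eq_pvScat0, List.length_map,
      show (pvDealN (List.range n.toNat)).length = n.toNat by
        simpa using (pvDealN_perm (List.range n.toNat)).length_eq]
  exact pv_core n.toNat
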